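-- pv_equiv track=rewrite | github.com/Alouetter/Lark-Formatter | src/formula_core/normalize.py | _consume_brace_group
-- ===== SOURCE A (Python) =====
-- def _consume_brace_group(text: str, pos: int) -> int:
--     if pos >= len(text) or text[pos] != "{":
--         return pos
--     depth = 1
--     idx = pos + 1
--     while idx < len(text) and depth > 0:
--         if text[idx] == "{":
--             depth += 1
--         elif text[idx] == "}":
--             depth -= 1
--         idx += 1
--     return idx if depth == 0 else pos
-- ===== SOURCE B (Python) =====
-- def _consume_brace_group(text: str, pos: int) -> int:
--     if pos >= len(text) or text[pos] != "{":
--         return pos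
--     idx = pos + 1
--     while idx < len(text):
--         ch = text[idx]
--         if ch == "}":
--             return idx + 1
--         if ch == "{":
--             nxt = _consume_brace_group(text, idx)
--             if nxt == idx:
--                 return pos
--             idx = nxt
--         else:
--             idx += 1
--     return pos
-- ===== Notes on version B (the rewrite author's own statement) =====
-- stated objective: alternative
-- what changed: Replaces A's single loop with an integer depth counter by recursive descent: one scan per nesting level that recurses into each inner '{' group and jumps past it, treating an inner scan returning its own start as imbalance.
import Mathlib
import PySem

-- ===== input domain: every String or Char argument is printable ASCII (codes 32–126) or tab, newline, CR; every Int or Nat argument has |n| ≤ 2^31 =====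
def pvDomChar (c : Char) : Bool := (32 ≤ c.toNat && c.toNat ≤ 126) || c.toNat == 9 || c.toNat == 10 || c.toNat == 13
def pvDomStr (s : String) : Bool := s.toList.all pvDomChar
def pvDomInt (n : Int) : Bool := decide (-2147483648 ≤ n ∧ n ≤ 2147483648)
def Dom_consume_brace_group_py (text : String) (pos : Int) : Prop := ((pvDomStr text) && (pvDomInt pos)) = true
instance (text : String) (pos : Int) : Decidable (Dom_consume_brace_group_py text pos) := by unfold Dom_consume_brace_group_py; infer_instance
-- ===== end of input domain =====

-- B replaces A's integer depth counter by recursive descent over nested brace groups (objective: alternative, same cost).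

-- ===== PORT A =====
-- A's while loop: returns the final (depth, idx) pair of the loop.
-- text[idx] inside the loop always hits a valid (possibly negative, Python-wrapping) index
-- under Pre_, so the `.getD ' '` default is never used there.
def aLoop (cs : List Char) (depth idx : Int) : Int × Int :=
  if h : idx < (cs.length : Int) ∧ 0 < depth then
    let c := (PySem.List.pyGet? cs idx).getD ' '
    let d' := if c = '{' then depth + 1 else if c = '}' then depth - 1 else depth
    aLoop cs d' (idx + 1)
  else (depth, idx)
termination_by ((cs.length : Int) - idx).toNat
decreasing_by omega

def consume_brace_group_py (text : String) (pos : Int) : Int :=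
  let cs := text.toList
  if (cs.length : Int) ≤ pos ∨ (PySem.List.pyGet? cs pos).getD ' ' ≠ '{' then pos
  else
    let r := aLoop cs 1 (pos + 1)
    if r.1 = 0 then r.2 else pos

-- ===== PORT B =====
-- Source B's recursive descent, with a fuel counter that only makes the recursion
-- structurally total in Lean (fuel 4*len+4 is proved sufficient on admitted inputs;
-- it never changes the result there). bMain is _consume_brace_group, bScan its while loop.
mutual
def bMain (cs : List Char) (fuel : Nat) (pos : Int) : Int :=
  match fuel with
  | 0 => pos
  | fuel + 1 =>
    if (cs.length : Int) ≤ pos ∨ (PySem.List.pyGet? cs pos).getD ' ' ≠ '{' then pos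
    else bScan cs fuel pos (pos + 1)

def bScan (cs : List Char) (fuel : Nat) (pos idx : Int) : Int :=
  match fuel with
  | 0 => pos
  | fuel + 1 =>
    if (cs.length : Int) ≤ idx then pos
    else
      let c := (PySem.List.pyGet? cs idx).getD ' '
      if c = '}' then idx + 1
      else if c = '{' then
        let nxt := bMain cs fuel idx
        if nxt = idx then pos else bScan cs fuel pos nxt
      else bScan cs fuel pos (idx + 1)
end

def consume_brace_group_py_alt (text : String) (pos : Int) : Int :=
  bMain text.toList (4 * text.toList.length + 4) pos

-- ===== PRECONDITION & SPEC =====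
-- Pre_ excludes exactly pos < -len(text), where Python's text[pos] raises IndexError (in A and in B alike).
def Pre_consume_brace_group_py (text : String) (pos : Int) : Prop :=
  -(text.toList.length : Int) ≤ pos
instance (text : String) (pos : Int) : Decidable (Pre_consume_brace_group_py text pos) := by
  unfold Pre_consume_brace_group_py; infer_instance

def pvWitness_consume_brace_group_py : String × Int := ("{a{b}c}", 0)

def Spec_consume_brace_group_py (text : String) (pos : Int) (out : Int) : Prop := out = consume_brace_group_py_alt text pos
instance (text : String) (pos : Int) (out : Int) : Decidable (Spec_consume_brace_group_py text pos out) := by unfold Spec_consume_brace_group_py; infer_instance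

-- ===== CLAIM (what is proved, stated in full; the proofs are below) =====
def Claim_equal_consume_brace_group_py : Prop := ∀ (text : String) (pos : Int), Dom_consume_brace_group_py text pos → Pre_consume_brace_group_py text pos → Spec_consume_brace_group_py text pos (consume_brace_group_py text pos)

-- ===== LEMMAS AND PROOFS =====

-- one-step equations for A's loop
theorem aLoop_stop (cs : List Char) (depth idx : Int)
    (h : ¬(idx < (cs.length : Int) ∧ 0 < depth)) : aLoop cs depth idx = (depth, idx) := by
  rw [aLoop, dif_neg h]

theorem aLoop_step_open (cs : List Char) (depth idx : Int)
    (h : idx < (cs.length : Int) ∧ 0 < depth)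
    (hb : (PySem.List.pyGet? cs idx).getD ' ' = '{') :
    aLoop cs depth idx = aLoop cs (depth + 1) (idx + 1) := by
  rw [aLoop, dif_pos h]; simp [hb]

theorem aLoop_step_close (cs : List Char) (depth idx : Int)
    (h : idx < (cs.length : Int) ∧ 0 < depth)
    (hb : (PySem.List.pyGet? cs idx).getD ' ' = '}') :
    aLoop cs depth idx = aLoop cs (depth - 1) (idx + 1) := by
  rw [aLoop, dif_pos h]; simp [hb]

theorem aLoop_step_other (cs : List Char) (depth idx : Int)
    (h : idx < (cs.length : Int) ∧ 0 < depth)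
    (h1 : (PySem.List.pyGet? cs idx).getD ' ' ≠ '{')
    (h2 : (PySem.List.pyGet? cs idx).getD ' ' ≠ '}') :
    aLoop cs depth idx = aLoop cs depth (idx + 1) := by
  rw [aLoop, dif_pos h]; simp [h1, h2]

-- one-step equations for B's recursion
theorem bMain_ret (cs : List Char) (f : Nat) (pos : Int)
    (h : (cs.length : Int) ≤ pos ∨ (PySem.List.pyGet? cs pos).getD ' ' ≠ '{') :
    bMain cs (f + 1) pos = pos := by
  rw [bMain, if_pos h]

theorem bMain_go (cs : List Char) (f : Nat) (pos : Int)
    (h : ¬((cs.length : Int) ≤ pos ∨ (PySem.List.pyGet? cs pos).getD ' ' ≠ '{')) :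
    bMain cs (f + 1) pos = bScan cs f pos (pos + 1) := by
  rw [bMain, if_neg h]

theorem bScan_end (cs : List Char) (f : Nat) (pos idx : Int)
    (h : (cs.length : Int) ≤ idx) : bScan cs (f + 1) pos idx = pos := by
  rw [bScan, if_pos h]

theorem bScan_close (cs : List Char) (f : Nat) (pos idx : Int)
    (h : ¬((cs.length : Int) ≤ idx))
    (hb : (PySem.List.pyGet? cs idx).getD ' ' = '}') :
    bScan cs (f + 1) pos idx = idx + 1 := by
  rw [bScan, if_neg h]; simp [hb]

theorem bScan_open (cs : List Char) (f : Nat) (pos idx : Int)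
    (h : ¬((cs.length : Int) ≤ idx))
    (hb : (PySem.List.pyGet? cs idx).getD ' ' = '{') :
    bScan cs (f + 1) pos idx =
      (if bMain cs f idx = idx then pos else bScan cs f pos (bMain cs f idx)) := by
  rw [bScan, if_neg h]; simp [hb]

theorem bScan_other (cs : List Char) (f : Nat) (pos idx : Int)
    (h : ¬((cs.length : Int) ≤ idx))
    (h1 : (PySem.List.pyGet? cs idx).getD ' ' ≠ '{')
    (h2 : (PySem.List.pyGet? cs idx).getD ' ' ≠ '}') :
    bScan cs (f + 1) pos idx = bScan cs f pos (idx + 1) := by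
  rw [bScan, if_neg h]; simp [h1, h2]

-- A's loop never moves idx backwards
theorem aLoop_idx_le (cs : List Char) : ∀ (n : Nat) (depth idx : Int),
    ((cs.length : Int) - idx).toNat ≤ n → idx ≤ (aLoop cs depth idx).2 := by
  intro n
  induction n using Nat.strong_induction_on with
  | _ n ih =>
    intro depth idx hn
    by_cases h : idx < (cs.length : Int) ∧ 0 < depth
    · have hrec : ∀ d : Int, idx + 1 ≤ (aLoop cs d (idx + 1)).2 := fun d =>
        ih (n - 1) (by omega) d (idx + 1) (by omega)
      by_cases hb : (PySem.List.pyGet? cs idx).getD ' ' = '{'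
      · rw [aLoop_step_open cs depth idx h hb]; have := hrec (depth + 1); omega
      · by_cases hb2 : (PySem.List.pyGet? cs idx).getD ' ' = '}'
        · rw [aLoop_step_close cs depth idx h hb2]; have := hrec (depth - 1); omega
        · rw [aLoop_step_other cs depth idx h hb hb2]; have := hrec depth; omega
    · rw [aLoop_stop cs depth idx h]

-- A's loop keeps the depth nonnegative
theorem aLoop_depth_nonneg (cs : List Char) : ∀ (n : Nat) (depth idx : Int),
    ((cs.length : Int) - idx).toNat ≤ n → 0 ≤ depth → 0 ≤ (aLoop cs depth idx).1 := by
  intro n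
  induction n using Nat.strong_induction_on with
  | _ n ih =>
    intro depth idx hn hd
    by_cases h : idx < (cs.length : Int) ∧ 0 < depth
    · have hrec : ∀ d : Int, 0 ≤ d → 0 ≤ (aLoop cs d (idx + 1)).1 := fun d hd' =>
        ih (n - 1) (by omega) d (idx + 1) (by omega) hd'
      by_cases hb : (PySem.List.pyGet? cs idx).getD ' ' = '{'
      · rw [aLoop_step_open cs depth idx h hb]; exact hrec _ (by omega)
      · by_cases hb2 : (PySem.List.pyGet? cs idx).getD ' ' = '}'
        · rw [aLoop_step_close cs depth idx h hb2]; exact hrec _ (by omega)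
        · rw [aLoop_step_other cs depth idx h hb hb2]; exact hrec _ (by omega)
    · rw [aLoop_stop cs depth idx h]; exact hd

-- a successful level-1 scan consumed at least one character
theorem aLoop_succ_lt (cs : List Char) (j : Int) (h : (aLoop cs 1 j).1 = 0) :
    j + 1 ≤ (aLoop cs 1 j).2 := by
  by_cases hj : j < (cs.length : Int) ∧ (0 : Int) < 1
  · rw [aLoop, dif_pos hj] at h ⊢
    have := aLoop_idx_le cs ((cs.length : Int) - (j + 1)).toNat
      (if (PySem.List.pyGet? cs j).getD ' ' = '{' then (1 : Int) + 1
       else if (PySem.List.pyGet? cs j).getD ' ' = '}' then 1 - 1 else 1) (j + 1) (le_refl _)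
    omega
  · rw [aLoop_stop cs 1 j hj] at h; omega

-- depth-composition: a scan at depth d+1 is a level-1 scan followed (on success) by a scan at depth d
theorem aLoop_compose (cs : List Char) : ∀ (n : Nat) (idx d : Int),
    ((cs.length : Int) - idx).toNat ≤ n → 0 < d →
    aLoop cs (d + 1) idx =
      (if (aLoop cs 1 idx).1 = 0 then aLoop cs d (aLoop cs 1 idx).2
       else ((aLoop cs 1 idx).1 + d, (aLoop cs 1 idx).2)) := by
  intro n
  induction n using Nat.strong_induction_on with
  | _ n ih =>
    intro idx d hn hd
    by_cases hlt : idx < (cs.length : Int)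
    · have h1 : idx < (cs.length : Int) ∧ 0 < d + 1 := ⟨hlt, by omega⟩
      have h2 : idx < (cs.length : Int) ∧ (0 : Int) < 1 := ⟨hlt, by norm_num⟩
      have hn1 : ((cs.length : Int) - (idx + 1)).toNat ≤ n - 1 := by omega
      have hnpos : 1 ≤ n := by omega
      by_cases hbo : (PySem.List.pyGet? cs idx).getD ' ' = '{'
      · rw [aLoop_step_open cs (d + 1) idx h1 hbo, aLoop_step_open cs 1 idx h2 hbo]
        rw [ih (n - 1) (by omega) (idx + 1) (d + 1) hn1 (by omega),
            ih (n - 1) (by omega) (idx + 1) 1 hn1 (by norm_num)]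
        by_cases hz : (aLoop cs 1 (idx + 1)).1 = 0
        · rw [if_pos hz, if_pos hz]
          have hge : idx + 1 + 1 ≤ (aLoop cs 1 (idx + 1)).2 := aLoop_succ_lt cs (idx + 1) hz
          rw [ih (n - 1) (by omega) ((aLoop cs 1 (idx + 1)).2) d (by omega) hd]
        · rw [if_neg hz, if_neg hz]
          have hnn : 0 ≤ (aLoop cs 1 (idx + 1)).1 :=
            aLoop_depth_nonneg cs ((cs.length : Int) - (idx + 1)).toNat 1 (idx + 1)
              (le_refl _) (by norm_num)
          rw [if_neg (by simpa using by omega : ¬((aLoop cs 1 (idx + 1)).1 + 1 = 0))]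
          simp only [Prod.mk.injEq]
          exact ⟨by ring, trivial⟩
      · by_cases hbc : (PySem.List.pyGet? cs idx).getD ' ' = '}'
        · rw [aLoop_step_close cs (d + 1) idx h1 hbc, aLoop_step_close cs 1 idx h2 hbc]
          have h0 : aLoop cs (1 - 1) (idx + 1) = (1 - 1, idx + 1) :=
            aLoop_stop cs (1 - 1) (idx + 1) (by intro hh; omega)
          rw [h0]
          norm_num
        · rw [aLoop_step_other cs (d + 1) idx h1 hbo hbc,
              aLoop_step_other cs 1 idx h2 hbo hbc]
          exact ih (n - 1) (by omega) (idx + 1) d hn1 hd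
    · have hna : ¬(idx < (cs.length : Int) ∧ 0 < d + 1) := fun hh => hlt hh.1
      have hnb : ¬(idx < (cs.length : Int) ∧ (0 : Int) < 1) := fun hh => hlt hh.1
      rw [aLoop_stop cs (d + 1) idx hna, aLoop_stop cs 1 idx hnb]
      rw [if_neg (by norm_num : ¬((1 : Int), idx).1 = 0)]
      simp only [Prod.mk.injEq]
      exact ⟨by ring, trivial⟩

-- main lemma: B's scan with enough fuel computes A's level-1 loop result
theorem bScan_eq (cs : List Char) : ∀ (n : Nat) (idx pos : Int) (fuel : Nat),
    ((cs.length : Int) - idx).toNat ≤ n → 2 * n + 2 ≤ fuel →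
    bScan cs fuel pos idx =
      (if (aLoop cs 1 idx).1 = 0 then (aLoop cs 1 idx).2 else pos) := by
  intro n
  induction n using Nat.strong_induction_on with
  | _ n ih =>
    intro idx pos fuel hn hf
    obtain ⟨f, rfl⟩ : ∃ f, fuel = f + 1 := ⟨fuel - 1, by omega⟩
    by_cases hlt : idx < (cs.length : Int)
    · have h2 : idx < (cs.length : Int) ∧ (0 : Int) < 1 := ⟨hlt, by norm_num⟩
      have hend : ¬((cs.length : Int) ≤ idx) := by omega
      have hn1 : ((cs.length : Int) - (idx + 1)).toNat ≤ n - 1 := by omega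
      have hnpos : 1 ≤ n := by omega
      by_cases hbc : (PySem.List.pyGet? cs idx).getD ' ' = '}'
      · rw [bScan_close cs f pos idx hend hbc, aLoop_step_close cs 1 idx h2 hbc]
        have h0 : aLoop cs (1 - 1) (idx + 1) = (1 - 1, idx + 1) :=
          aLoop_stop cs (1 - 1) (idx + 1) (by intro hh; omega)
        rw [h0]
        norm_num
      · by_cases hbo : (PySem.List.pyGet? cs idx).getD ' ' = '{'
        · rw [bScan_open cs f pos idx hend hbo]
          obtain ⟨g, rfl⟩ : ∃ g, f = g + 1 := ⟨f - 1, by omega⟩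
          rw [bMain_go cs g idx (by push Not; exact ⟨by omega, hbo⟩)]
          rw [ih (n - 1) (by omega) (idx + 1) idx g hn1 (by omega)]
          rw [aLoop_step_open cs 1 idx h2 hbo,
              aLoop_compose cs (n - 1) (idx + 1) 1 hn1 (by norm_num)]
          by_cases hz : (aLoop cs 1 (idx + 1)).1 = 0
          · rw [if_pos hz, if_pos hz]
            have hge : idx + 1 + 1 ≤ (aLoop cs 1 (idx + 1)).2 := aLoop_succ_lt cs (idx + 1) hz
            rw [if_neg (by omega : ¬((aLoop cs 1 (idx + 1)).2 = idx))]
            exact ih (n - 1) (by omega) ((aLoop cs 1 (idx + 1)).2) pos (g + 1) (by omega) (by omega)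
          · rw [if_neg hz, if_neg hz]
            have hnn : 0 ≤ (aLoop cs 1 (idx + 1)).1 :=
              aLoop_depth_nonneg cs ((cs.length : Int) - (idx + 1)).toNat 1 (idx + 1)
                (le_refl _) (by norm_num)
            rw [if_pos rfl]
            rw [if_neg (by simp; omega : ¬(((aLoop cs 1 (idx + 1)).1 + 1, (aLoop cs 1 (idx + 1)).2).1 = 0))]
        · rw [bScan_other cs f pos idx hend hbo hbc,
              aLoop_step_other cs 1 idx h2 hbo hbc]
          exact ih (n - 1) (by omega) (idx + 1) pos f hn1 (by omega)
    · rw [bScan_end cs f pos idx (by omega)]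
      rw [aLoop_stop cs 1 idx (fun hh => hlt hh.1)]
      norm_num

-- ===== VERDICT (by name: the statement is the Claim_ definition above) =====
theorem consume_brace_group_py_spec : Claim_equal_consume_brace_group_py := by
  intro text pos _hdom hpre
  unfold Spec_consume_brace_group_py consume_brace_group_py consume_brace_group_py_alt
  simp only
  unfold Pre_consume_brace_group_py at hpre
  by_cases hg : (text.toList.length : Int) ≤ pos ∨ (PySem.List.pyGet? text.toList pos).getD ' ' ≠ '{'
  · rw [if_pos hg, bMain_ret text.toList (4 * text.toList.length + 3) pos hg]
  · rw [if_neg hg, bMain_go text.toList (4 * text.toList.length + 3) pos hg]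
    push Not at hg
    rw [bScan_eq text.toList (2 * text.toList.length) (pos + 1) pos (4 * text.toList.length + 3)
      (by omega) (by omega)]
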